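-- pv_equiv track=rewrite | github.com/sgttomas/vibe-project | framework/chirality/core/validate.py | validate_operation_sequence
-- ===== SOURCE A (Python) =====
-- from typing import List, Dict, Any, Optional
--
-- def validate_operation_sequence(operations: List[str]) -> List[str]:
--     """
--     Validate CF14 operation sequence rules.
--
--     Rules:
--     - Multiply before add
--     - Interpret after base operations
--
--     Args:
--         operations: List of operation types
--
--     Returns:
--         List of validation errors
--     """
--     errors = []
--
--     # Check for multiply before add rule
--     last_multiply_idx = -1
--     first_add_idx = len(operations)
--
--     for i, op in enumerate(operations):
--         if op == "multiply":
--             last_multiply_idx = i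
--         elif op == "add" and first_add_idx == len(operations):
--             first_add_idx = i
--
--     if first_add_idx < last_multiply_idx:
--         errors.append("Addition operation before multiplication (violates CF14 sequence)")
--
--     return errors
-- ===== SOURCE B (Python) =====
-- def validate_operation_sequence(operations):
--     """Single pass with a seen_add flag; return the single error as soon as a
--     'multiply' is seen after an 'add', instead of computing first_add/last_multiply indices."""
--     seen_add = False
--     for op in operations:
--         if op == "add":
--             seen_add = True
--         elif op == "multiply" and seen_add:
--             return ["Addition operation before multiplication (violates CF14 sequence)"]
--     return []
-- ===== Notes on version B (the rewrite author's own statement) =====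
-- stated objective: simpler
-- what changed: Replaces the index bookkeeping (last multiply index, first add index, final comparison) by a single boolean seen_add flag with an early return on the first multiply that follows an add.
import Mathlib
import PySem

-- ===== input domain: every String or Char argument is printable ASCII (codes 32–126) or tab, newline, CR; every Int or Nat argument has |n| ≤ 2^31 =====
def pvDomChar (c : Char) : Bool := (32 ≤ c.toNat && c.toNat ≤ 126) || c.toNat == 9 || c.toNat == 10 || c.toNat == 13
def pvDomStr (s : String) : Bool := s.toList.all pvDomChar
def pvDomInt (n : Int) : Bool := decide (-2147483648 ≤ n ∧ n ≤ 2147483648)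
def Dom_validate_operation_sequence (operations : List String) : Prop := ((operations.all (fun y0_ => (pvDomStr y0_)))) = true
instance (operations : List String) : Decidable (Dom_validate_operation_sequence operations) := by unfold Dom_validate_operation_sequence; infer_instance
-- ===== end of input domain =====

-- B replaces A's last-multiply/first-add index bookkeeping by a single seen_add flag with an
-- early return (objective: simpler); return values proved equal on all inputs.

-- ===== PORT A =====
-- the for-loop over enumerate(operations): state = (last_multiply_idx, first_add_idx)
def pvALoop (n : Int) : List (Int × String) → Int × Int → Int × Int
  | [], s => s
  | (i, op) :: rest, (lm, fa) =>
    if op = "multiply" then pvALoop n rest (i, fa)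
    else if op = "add" ∧ fa = n then pvALoop n rest (lm, i)
    else pvALoop n rest (lm, fa)

def validate_operation_sequence (operations : List String) : List String :=
  let n : Int := operations.length
  let s := pvALoop n (PySem.List.enumerate operations 0) (-1, n)
  if s.2 < s.1 then ["Addition operation before multiplication (violates CF14 sequence)"] else []

-- ===== PORT B =====
def pvBLoop : List String → Bool → List String
  | [], _ => []
  | op :: rest, seen =>
    if op = "add" then pvBLoop rest true
    else if op = "multiply" ∧ seen then ["Addition operation before multiplication (violates CF14 sequence)"]
    else pvBLoop rest seen

def validate_operation_sequence_alt (operations : List String) : List String :=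
  pvBLoop operations false

-- ===== PRECONDITION & SPEC =====
def Spec_validate_operation_sequence (operations : List String) (out : List String) : Prop := out = validate_operation_sequence_alt operations
instance (operations : List String) (out : List String) : Decidable (Spec_validate_operation_sequence operations out) := by unfold Spec_validate_operation_sequence; infer_instance

-- ===== CLAIM (what is proved, stated in full; the proofs are below) =====
def Claim_equal_validate_operation_sequence : Prop := ∀ (operations : List String), Dom_validate_operation_sequence operations → Spec_validate_operation_sequence operations (validate_operation_sequence operations)

-- ===== LEMMAS AND PROOFS =====

-- once a violation is recorded in the state (fa < lm, fa ≠ n), it persists through the loop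
theorem pvALoop_mono (l : List String) : ∀ (n i lm fa : Int), fa < i → fa < lm → fa ≠ n →
    (pvALoop n (PySem.List.enumerate l i) (lm, fa)).2 < (pvALoop n (PySem.List.enumerate l i) (lm, fa)).1 := by
  induction l with
  | nil => intro n i lm fa h1 h2 h3; simpa [pvALoop, PySem.List.enumerate]
  | cons op rest ih =>
    intro n i lm fa h1 h2 h3
    rw [PySem.List.enumerate_cons]
    by_cases hmul : op = "multiply"
    · have hstep : pvALoop n ((i, op) :: PySem.List.enumerate rest (i+1)) (lm, fa)
          = pvALoop n (PySem.List.enumerate rest (i+1)) (i, fa) := by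
        simp [pvALoop, hmul]
      rw [hstep]
      exact ih n (i+1) i fa (by omega) h1 h3
    · by_cases haddn : op = "add" ∧ fa = n
      · exact absurd haddn.2 h3
      · have hstep : pvALoop n ((i, op) :: PySem.List.enumerate rest (i+1)) (lm, fa)
            = pvALoop n (PySem.List.enumerate rest (i+1)) (lm, fa) := by
          simp [pvALoop, hmul, haddn]
        rw [hstep]
        exact ih n (i+1) lm fa (by omega) h2 h3

theorem pvLoop_key (l : List String) : ∀ (n i lm fa : Int),
    (fa = n ∨ fa < i) → lm < i → i + (l.length : Int) ≤ n → ¬ fa < lm →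
    pvBLoop l (decide (fa ≠ n)) =
      (if (pvALoop n (PySem.List.enumerate l i) (lm, fa)).2 < (pvALoop n (PySem.List.enumerate l i) (lm, fa)).1
       then ["Addition operation before multiplication (violates CF14 sequence)"] else []) := by
  induction l with
  | nil =>
    intro n i lm fa hfa hlm hn hviol
    simp [pvALoop, PySem.List.enumerate, pvBLoop, if_neg hviol]
  | cons op rest ih =>
    intro n i lm fa hfa hlm hn hviol
    simp only [List.length_cons] at hn
    rw [PySem.List.enumerate_cons]
    by_cases hadd : op = "add"
    · subst hadd
      have hB : pvBLoop ("add" :: rest) (decide (fa ≠ n)) = pvBLoop rest true := by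
        simp [pvBLoop]
      rw [hB]
      by_cases hfan : fa = n
      · have hstep : pvALoop n ((i, "add") :: PySem.List.enumerate rest (i+1)) (lm, fa)
            = pvALoop n (PySem.List.enumerate rest (i+1)) (lm, i) := by
          simp [pvALoop, hfan]
        simp only [hstep]
        have hin : i ≠ n := by push_cast at hn; omega
        have h := ih n (i+1) lm i (Or.inr (by omega)) (by omega) (by push_cast at hn ⊢; omega) (by omega)
        rw [decide_eq_true hin] at h
        exact h
      · have hstep : pvALoop n ((i, "add") :: PySem.List.enumerate rest (i+1)) (lm, fa)
            = pvALoop n (PySem.List.enumerate rest (i+1)) (lm, fa) := by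
          simp [pvALoop, hfan]
        simp only [hstep]
        have h := ih n (i+1) lm fa
          (by rcases hfa with h | h; exact absurd h hfan; exact Or.inr (by omega))
          (by omega) (by push_cast at hn ⊢; omega) hviol
        rw [decide_eq_true hfan] at h
        exact h
    · by_cases hmul : op = "multiply"
      · subst hmul
        have hstep : pvALoop n ((i, "multiply") :: PySem.List.enumerate rest (i+1)) (lm, fa)
            = pvALoop n (PySem.List.enumerate rest (i+1)) (i, fa) := by
          simp [pvALoop]
        by_cases hfan : fa = n
        · have hB : pvBLoop ("multiply" :: rest) (decide (fa ≠ n)) = pvBLoop rest (decide (fa ≠ n)) := by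
            simp [pvBLoop, hfan]
          rw [hB]
          simp only [hstep]
          have hnlt : ¬ fa < i := by subst hfan; push_cast at hn; omega
          exact ih n (i+1) i fa (Or.inl hfan) (by omega) (by push_cast at hn ⊢; omega) hnlt
        · have hfai : fa < i := by rcases hfa with h | h; exact absurd h hfan; exact h
          have hB : pvBLoop ("multiply" :: rest) (decide (fa ≠ n))
              = ["Addition operation before multiplication (violates CF14 sequence)"] := by
            simp [pvBLoop, hfan]
          rw [hB]
          simp only [hstep]
          rw [if_pos (pvALoop_mono rest n (i+1) i fa (by omega) hfai hfan)]
      · have hstep : pvALoop n ((i, op) :: PySem.List.enumerate rest (i+1)) (lm, fa)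
            = pvALoop n (PySem.List.enumerate rest (i+1)) (lm, fa) := by
          simp [pvALoop, hmul, hadd]
        have hB : pvBLoop (op :: rest) (decide (fa ≠ n)) = pvBLoop rest (decide (fa ≠ n)) := by
          simp [pvBLoop, hmul, hadd]
        rw [hB]
        simp only [hstep]
        exact ih n (i+1) lm fa
          (by rcases hfa with h | h; exact Or.inl h; exact Or.inr (by omega))
          (by omega) (by push_cast at hn ⊢; omega) hviol

-- ===== VERDICT (by name: the statement is the Claim_ definition above) =====
theorem validate_operation_sequence_spec : Claim_equal_validate_operation_sequence := by
  intro operations _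
  unfold Spec_validate_operation_sequence validate_operation_sequence validate_operation_sequence_alt
  have h := pvLoop_key operations (operations.length : Int) 0 (-1) (operations.length : Int)
    (Or.inl rfl) (by omega) (by omega) (by omega)
  rw [decide_eq_false (by simp)] at h
  simp only [← h]
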